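-- pv_equiv track=rewrite | github.com/studio501/commitxml | commit_xml/split_atlas.py | dec_bynum
-- ===== SOURCE A (Python) =====
-- def dec_bynum(arr, dec):
--     arr_len = len(arr)
--
--     trave_idx = 0
--     temp = []
--     for i in range(0, arr_len, 1 + dec):
--         trave_idx = i
--         temp.append(i)
--
--     if trave_idx != arr_len - 1:
--         temp.append(arr_len - 1)
--
--     del_elements = []
--     for i, e in enumerate(arr):
--         if not i in temp:
--             del_elements.append(e)
--
--     return del_elements
-- ===== SOURCE B (Python) =====
-- def dec_bynum(arr, dec):
--     n = len(arr)
--     kept = list(range(0, n, 1 + dec))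
--     if not kept or kept[-1] != n - 1:
--         kept.append(n - 1)
--     removed = []
--     prev = -1
--     for k in kept:
--         removed.extend(arr[prev + 1:k])
--         prev = k
--     removed.extend(arr[prev + 1:])
--     return removed
-- ===== Notes on version B (the rewrite author's own statement) =====
-- stated objective: simpler
-- what changed: A collects kept indices in a hand-rolled loop and then scans every element with a per-element membership test against that list; B builds the kept indices with range() directly and copies the gaps between consecutive kept indices by slicing, with no membership test at all. Pre_ excludes only dec == -1, where A raises ValueError (range step 0); B raises there too.
-- intended difference: On a single-element list with dec <= -2 the sampling range is empty and A's stale trave_idx = 0 coincidentally equals the last index, so A returns the whole list [x] as removed; B returns [], which is intended since the function always keeps the last element. — e.g. on dec_bynum([5], -2): A returns [5], B returns []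
import Mathlib
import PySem

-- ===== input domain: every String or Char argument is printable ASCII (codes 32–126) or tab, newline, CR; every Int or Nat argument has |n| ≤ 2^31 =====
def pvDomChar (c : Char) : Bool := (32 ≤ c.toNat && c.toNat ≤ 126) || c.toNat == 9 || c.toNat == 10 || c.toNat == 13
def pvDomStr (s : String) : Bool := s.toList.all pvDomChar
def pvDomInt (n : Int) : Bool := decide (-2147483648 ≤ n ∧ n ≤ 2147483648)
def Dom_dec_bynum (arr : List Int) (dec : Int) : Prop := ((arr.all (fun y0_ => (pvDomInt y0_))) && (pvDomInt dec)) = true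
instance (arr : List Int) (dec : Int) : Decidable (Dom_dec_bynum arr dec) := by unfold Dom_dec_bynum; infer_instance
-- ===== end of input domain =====

-- B builds the kept indices with range() and copies the gaps between them by slicing instead of A's per-element membership scan (simpler decomposition); on [x] with dec ≤ -2 A's stale trave_idx makes it remove the sole element while B keeps it (see D_).


-- ===== PORT A =====
def dec_bynum (arr : List Int) (dec : Int) : List Int :=
  let arr_len : Int := (arr.length : Int)
  -- for i in range(0, arr_len, 1 + dec): trave_idx = i; temp.append(i)
  let st := (PySem.List.pyRange 0 arr_len (1 + dec)).foldl
      (fun (st : Int × List Int) i => (i, st.2 ++ [i])) (0, [])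
  let trave_idx := st.1
  let temp := if trave_idx ≠ arr_len - 1 then st.2 ++ [arr_len - 1] else st.2
  -- for i, e in enumerate(arr): if not i in temp: del_elements.append(e)
  (PySem.List.enumerate arr).foldl
      (fun del_elements ie => if (!(temp.contains ie.1)) then del_elements ++ [ie.2] else del_elements) []

-- ===== PORT B =====
def dec_bynum_alt (arr : List Int) (dec : Int) : List Int :=
  let n : Int := (arr.length : Int)
  -- kept = list(range(0, n, 1 + dec))
  let kept0 := PySem.List.pyRange 0 n (1 + dec)
  -- if not kept or kept[-1] != n - 1: kept.append(n - 1)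
  let kept := if kept0 = [] ∨ kept0.getLast? ≠ some (n - 1) then kept0 ++ [n - 1] else kept0
  -- prev = -1; for k in kept: removed.extend(arr[prev+1:k]); prev = k
  let pr := kept.foldl
      (fun (st : Int × List Int) k => (k, st.2 ++ PySem.List.slice arr (some (st.1 + 1)) (some k))) (-1, [])
  -- removed.extend(arr[prev+1:])
  pr.2 ++ PySem.List.slice arr (some (pr.1 + 1)) none

-- ===== PRECONDITION & SPEC =====
-- Pre_ excludes only dec = -1, where A raises ValueError (range() step 0); B raises there too.
def Pre_dec_bynum (arr : List Int) (dec : Int) : Prop := dec ≠ -1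
instance (arr : List Int) (dec : Int) : Decidable (Pre_dec_bynum arr dec) := by unfold Pre_dec_bynum; infer_instance
def pvWitness_dec_bynum : List Int × Int := ([1, 2, 3], 1)

-- On a single-element list with dec ≤ -2 the sampling range is empty and A's stale trave_idx = 0 coincidentally
-- equals the last index, so A returns the whole list [x] as removed; B returns [], which is intended since the
-- function always keeps the last element.
def D_dec_bynum (arr : List Int) (dec : Int) : Prop := arr.length = 1 ∧ dec ≤ -2
instance (arr : List Int) (dec : Int) : Decidable (D_dec_bynum arr dec) := by unfold D_dec_bynum; infer_instance

def Spec_dec_bynum (arr : List Int) (dec : Int) (out : List Int) : Prop := ¬ D_dec_bynum arr dec → out = dec_bynum_alt arr dec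
instance (arr : List Int) (dec : Int) (out : List Int) : Decidable (Spec_dec_bynum arr dec out) := by unfold Spec_dec_bynum; infer_instance

def pvDiffWitness_dec_bynum : List Int × Int := ([5], -2)
def pvDiffWitnessOut_dec_bynum : (List Int) × (List Int) := ([5], [])

-- ===== CLAIM (what is proved, stated in full; the proofs are below) =====
def Claim_unchanged_dec_bynum : Prop := ∀ (arr : List Int) (dec : Int), Dom_dec_bynum arr dec → Pre_dec_bynum arr dec → Spec_dec_bynum arr dec (dec_bynum arr dec)
def Claim_changed_dec_bynum : Prop := Dom_dec_bynum (pvDiffWitness_dec_bynum.1) (pvDiffWitness_dec_bynum.2) ∧ Pre_dec_bynum (pvDiffWitness_dec_bynum.1) (pvDiffWitness_dec_bynum.2) ∧ D_dec_bynum (pvDiffWitness_dec_bynum.1) (pvDiffWitness_dec_bynum.2) ∧ dec_bynum (pvDiffWitness_dec_bynum.1) (pvDiffWitness_dec_bynum.2) = pvDiffWitnessOut_dec_bynum.1 ∧ dec_bynum_alt (pvDiffWitness_dec_bynum.1) (pvDiffWitness_dec_bynum.2) = pvDiffWitnessOut_dec_bynum.2 ∧ pvDiffWitnessOut_dec_bynum.1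 ≠ pvDiffWitnessOut_dec_bynum.2
def Claim_exact_dec_bynum : Prop := ∀ (arr : List Int) (dec : Int), Dom_dec_bynum arr dec → Pre_dec_bynum arr dec → D_dec_bynum arr dec → dec_bynum arr dec ≠ dec_bynum_alt arr dec

-- ===== LEMMAS AND PROOFS =====

theorem getLast?D_cons (a t : Int) (l : List Int) : (a :: l).getLast?.getD t = l.getLast?.getD a := by
  cases l <;> simp [List.getLast?_cons]

-- A's first loop: foldl collecting (last index, the whole range).
theorem foldl_collect (l : List Int) (t : Int) (acc : List Int) :
    l.foldl (fun (st : Int × List Int) i => (i, st.2 ++ [i])) (t, acc)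
      = (l.getLastD t, acc ++ l) := by
  induction l generalizing t acc with
  | nil => simp
  | cons a l ih => simp [ih, getLast?D_cons]

-- range(0, n, s) is empty for a negative step and 0 ≤ n.
theorem pyRange_neg_nil (n s : Int) (hs : s < 0) (hn : 0 ≤ n) :
    PySem.List.pyRange 0 n s = [] := by
  simp only [PySem.List.pyRange]
  split_ifs with h1 h2 h3 <;> first | rfl | omega

theorem pyRange_pos_pairwise (a n s : Int) (hs : 0 < s) :
    (PySem.List.pyRange a n s).Pairwise (· < ·) := by
  rw [PySem.List.pyRange_of_pos _ _ hs]
  refine List.Pairwise.map _ ?_ (List.pairwise_lt_range)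
  intro x y hxy
  have : (x : Int) < (y : Int) := by exact_mod_cast hxy
  nlinarith

-- in a strictly increasing list every element is at most the last one.
theorem max_getLastD : ∀ (l : List Int), l.Pairwise (· < ·) → ∀ (d x : Int), x ∈ l → x ≤ l.getLastD d := by
  intro l
  induction l with
  | nil => intro _ _ x hx; simp at hx
  | cons a l ih =>
      intro hp d x hx
      rw [List.pairwise_cons] at hp
      rw [List.getLastD_cons]
      rcases List.mem_cons.mp hx with rfl | hxl
      · cases l with
        | nil => simp
        | cons b l' =>
            have hb : x < b := hp.1 b (by simp)
            have hble := ih hp.2 x b (by simp)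
            omega
      · exact ih hp.2 a x hxl

theorem getLastD_mem (l : List Int) (d : Int) (h : l ≠ []) : l.getLastD d ∈ l := by
  cases l with
  | nil => exact absurd rfl h
  | cons a l => rw [List.getLastD_cons]; exact List.mem_of_mem_getLast? (by simp [List.getLast?_cons])

-- enumerate-filter bookkeeping ------------------------------------------------

theorem filt_tail {α : Type} (xs : List α) (s p : Int) :
    (((PySem.List.enumerate xs s).filter (fun pr => decide (p < pr.1))).map (·.2))
      = xs.drop (p + 1 - s).toNat := by
  induction xs generalizing s with
  | nil => simp [PySem.List.enumerate_nil]
  | cons x xs ih =>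
      rw [PySem.List.enumerate_cons]
      simp only [List.filter_cons]
      by_cases h : p < s
      · rw [if_pos (by simp [h]), List.map_cons, ih (s + 1),
          show (p + 1 - (s + 1)).toNat = 0 from by omega,
          show (p + 1 - s).toNat = 0 from by omega, List.drop_zero, List.drop_zero]
      · rw [if_neg (by simp [h]), ih (s + 1),
          show (p + 1 - s).toNat = (p + 1 - (s + 1)).toNat + 1 from by omega,
          List.drop_succ_cons]

theorem filt_interval {α : Type} (xs : List α) (s p k : Int) :
    (((PySem.List.enumerate xs s).filter (fun pr => decide (p < pr.1) && decide (pr.1 < k))).map (·.2))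
      = (xs.drop (p + 1 - s).toNat).take (k - s - ((p + 1 - s).toNat : Int)).toNat := by
  induction xs generalizing s with
  | nil => simp [PySem.List.enumerate_nil]
  | cons x xs ih =>
      rw [PySem.List.enumerate_cons]
      simp only [List.filter_cons]
      by_cases h : p < s
      · by_cases h2 : s < k
        · rw [if_pos (by simp [h, h2])]
          have h0 : (p + 1 - s).toNat = 0 := by omega
          have h1 : (p + 1 - (s + 1)).toNat = 0 := by omega
          rw [List.map_cons, ih (s + 1), h0, h1, List.drop_zero, List.drop_zero,
            show (k - s - ((0 : ℕ) : Int)).toNat = (k - (s + 1) - ((0 : ℕ) : Int)).toNat + 1 from by omega,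
            List.take_succ_cons]
        · rw [if_neg (by simp [h, h2])]
          rw [ih (s + 1),
            show (k - (s + 1) - (((p + 1 - (s + 1)).toNat : ℕ) : Int)).toNat = 0 from by omega,
            show (k - s - (((p + 1 - s).toNat : ℕ) : Int)).toNat = 0 from by omega,
            List.take_zero, List.take_zero]
      · rw [if_neg (by simp [h])]
        rw [ih (s + 1), show (p + 1 - s).toNat = (p + 1 - (s + 1)).toNat + 1 from by omega,
          List.drop_succ_cons,
          show (k - s - ((((p + 1 - (s + 1)).toNat + 1 : ℕ)) : Int)).toNat
            = (k - (s + 1) - (((p + 1 - (s + 1)).toNat : ℕ) : Int)).toNat from by omega]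

theorem filt_none {α : Type} (xs : List α) (s : Int) (P : Int → Bool)
    (h : ∀ i, s ≤ i → P i = false) :
    (PySem.List.enumerate xs s).filter (fun pr => P pr.1) = [] := by
  induction xs generalizing s with
  | nil => simp [PySem.List.enumerate_nil]
  | cons x xs ih =>
      rw [PySem.List.enumerate_cons]
      simp only [List.filter_cons, h s le_rfl]
      exact ih (s + 1) (fun i hi => h i (by omega))

theorem filt_split {α : Type} (xs : List α) (s k : Int) (P1 P2 : Int → Bool)
    (h1 : ∀ i, P1 i = true → i < k) (h2 : ∀ i, P2 i = true → k < i) :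
    (PySem.List.enumerate xs s).filter (fun pr => P1 pr.1 || P2 pr.1)
      = (PySem.List.enumerate xs s).filter (fun pr => P1 pr.1)
        ++ (PySem.List.enumerate xs s).filter (fun pr => P2 pr.1) := by
  induction xs generalizing s with
  | nil => simp [PySem.List.enumerate_nil]
  | cons x xs ih =>
      rw [PySem.List.enumerate_cons]
      simp only [List.filter_cons]
      by_cases hp1 : P1 s = true
      · have hp2 : P2 s = false := by
          rcases Bool.eq_false_or_eq_true (P2 s) with h | h
          · exact absurd (lt_trans (h1 s hp1) (h2 s h)) (lt_irrefl s)
          · exact h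
        simp [hp1, hp2, ih (s + 1)]
      · have hp1' : P1 s = false := Bool.eq_false_iff.mpr hp1
        by_cases hp2 : P2 s = true
        · have hks : k < s := h2 s hp2
          have hnil : (PySem.List.enumerate xs (s + 1)).filter (fun pr => P1 pr.1) = [] := by
            refine filt_none xs (s + 1) P1 ?_
            intro i hi
            rcases Bool.eq_false_or_eq_true (P1 i) with h | h
            · exact absurd (h1 i h) (by omega)
            · exact h
          have hcongr : (PySem.List.enumerate xs (s + 1)).filter (fun pr => P1 pr.1 || P2 pr.1)
              = (PySem.List.enumerate xs (s + 1)).filter (fun pr => P2 pr.1) := by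
            rw [ih (s + 1), hnil, List.nil_append]
          simp [hp1', hp2, hnil, hcongr]
        · have hp2' : P2 s = false := Bool.eq_false_iff.mpr hp2
          simp [hp1', hp2', ih (s + 1)]

-- B's gap fold computes exactly the complement-of-K filter.
theorem gapRun_eq (K : List Int) (arr : List Int) (p : Int) (acc : List Int)
    (hp : -1 ≤ p) (hP : K.Pairwise (· < ·))
    (hb : ∀ k ∈ K, p < k ∧ k < (arr.length : Int)) :
    (K.foldl (fun (st : Int × List Int) k =>
        (k, st.2 ++ PySem.List.slice arr (some (st.1 + 1)) (some k))) (p, acc)).2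
      ++ PySem.List.slice arr
        (some ((K.foldl (fun (st : Int × List Int) k =>
          (k, st.2 ++ PySem.List.slice arr (some (st.1 + 1)) (some k))) (p, acc)).1 + 1)) none
      = acc ++ (((PySem.List.enumerate arr).filter
          (fun pr => decide (p < pr.1) && !(K.contains pr.1))).map (·.2)) := by
  induction K generalizing p acc with
  | nil =>
      simp only [List.foldl_nil]
      rw [PySem.List.slice_from arr (by omega : (0:Int) ≤ p + 1)]
      have : ((PySem.List.enumerate arr).filter (fun pr => decide (p < pr.1) && !(([] : List Int).contains pr.1)))
          = ((PySem.List.enumerate arr).filter (fun pr => decide (p < pr.1))) := by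
        simp
      rw [this, filt_tail arr 0 p]
      simp
  | cons k K ih =>
      have hk : p < k ∧ k < (arr.length : Int) := hb k (by simp)
      rw [List.pairwise_cons] at hP
      simp only [List.foldl_cons]
      rw [ih k (acc ++ PySem.List.slice arr (some (p + 1)) (some k)) (by omega) hP.2
          (fun j hj => ⟨hP.1 j hj, (hb j (by simp [hj])).2⟩)]
      rw [List.append_assoc]
      refine congrArg _ ?_
      -- slice (p+1) k  =  interval filter (p, k)
      have hslice : PySem.List.slice arr (some (p + 1)) (some k)
          = (((PySem.List.enumerate arr).filter (fun pr => decide (p < pr.1) && decide (pr.1 < k))).map (·.2)) := by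
        rw [PySem.List.slice_toNat arr (by omega : (0:Int) ≤ p + 1) (by omega : (0:Int) ≤ k)]
        rw [filt_interval arr 0 p k]
        rw [show (p + 1 - 0).toNat = (p + 1).toNat from by omega,
          show (k - 0 - (((p + 1).toNat : ℕ) : Int)).toNat = k.toNat - (p + 1).toNat from by omega]
      rw [hslice]
      -- membership in k :: K splits into the gap (p,k) and the region beyond k
      have hpred : ((PySem.List.enumerate arr).filter (fun pr => decide (p < pr.1) && !((k :: K).contains pr.1)))
          = ((PySem.List.enumerate arr).filter (fun pr =>
              (decide (p < pr.1) && decide (pr.1 < k)) || (decide (k < pr.1) && !(K.contains pr.1)))) := by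
        refine List.filter_congr ?_
        intro pr _
        have hKk : ∀ j ∈ K, k < j := hP.1
        by_cases h1 : pr.1 < k
        · have hnot : pr.1 ∉ K := fun hmem => absurd (hKk _ hmem) (by omega)
          by_cases h2 : p < pr.1 <;>
            simp [h1, h2, hnot, show ¬ (k < pr.1) from by omega, show pr.1 ≠ k from by omega]
        · by_cases h3 : pr.1 = k
          · simp [h3]
          · have hklt : k < pr.1 := by omega
            simp [show ¬ pr.1 < k from h1, hklt, show p < pr.1 from by omega,
              show pr.1 ≠ k from h3]
      rw [hpred]
      rw [filt_split arr 0 k (fun i => decide (p < i) && decide (i < k))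
          (fun i => decide (k < i) && !(K.contains i))
          (fun i hi => by simp at hi; exact hi.2)
          (fun i hi => by simp at hi; exact hi.1),
        List.map_append]

-- common final step: A's membership filter equals B's gap fold, for the shared kept list K.
theorem common (arr K : List Int) (hP : K.Pairwise (· < ·))
    (hb : ∀ k ∈ K, 0 ≤ k ∧ k < (arr.length : Int)) :
    (PySem.List.enumerate arr).foldl
        (fun del_elements ie => if (!(K.contains ie.1)) then del_elements ++ [ie.2] else del_elements) []
      = (K.foldl (fun (st : Int × List Int) k =>
          (k, st.2 ++ PySem.List.slice arr (some (st.1 + 1)) (some k))) (-1, [])).2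
        ++ PySem.List.slice arr
          (some ((K.foldl (fun (st : Int × List Int) k =>
            (k, st.2 ++ PySem.List.slice arr (some (st.1 + 1)) (some k))) (-1, [])).1 + 1)) none := by
  rw [PySem.List.foldl_append_if (fun (ie : Int × Int) => !(K.contains ie.1)) (fun (ie : Int × Int) => ie.2)
      (PySem.List.enumerate arr) []]
  rw [gapRun_eq K arr (-1) [] (by omega) hP (fun k hk => ⟨by have := (hb k hk).1; omega, (hb k hk).2⟩)]
  have hcongr : (PySem.List.enumerate arr).filter (fun (ie : Int × Int) => !(K.contains ie.1))
      = (PySem.List.enumerate arr).filter (fun pr => decide (-1 < pr.1) && !(K.contains pr.1)) := by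
    refine List.filter_congr ?_
    intro pr hpr
    rcases (PySem.List.mem_enumerate_iff arr 0 pr).mp hpr with ⟨k, hk, rfl⟩
    simp
    exact fun _ => by omega
  rw [hcongr]

-- the kept list K is strictly increasing and in bounds (positive step, nonempty arr)
theorem K_props (arr : List Int) (s : Int) (hs : 0 < s) (hlen : 0 < arr.length) :
    (let R := PySem.List.pyRange 0 (arr.length : Int) s;
     let K := if R.getLastD 0 ≠ (arr.length : Int) - 1 then R ++ [(arr.length : Int) - 1] else R;
     K.Pairwise (· < ·) ∧ ∀ k ∈ K, 0 ≤ k ∧ k < (arr.length : Int)) := by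
  set n : Int := (arr.length : Int) with hn
  set R := PySem.List.pyRange 0 n s with hR
  show (if R.getLastD 0 ≠ n - 1 then R ++ [n - 1] else R).Pairwise (· < ·) ∧
      ∀ k ∈ (if R.getLastD 0 ≠ n - 1 then R ++ [n - 1] else R), 0 ≤ k ∧ k < n
  have hPR : R.Pairwise (· < ·) := pyRange_pos_pairwise 0 n s hs
  have hmem : ∀ x ∈ R, 0 ≤ x ∧ x < n := by
    intro x hx
    rcases (PySem.List.mem_pyRange_iff_of_pos hs x).mp hx with ⟨h1, h2, _⟩
    exact ⟨by omega, h2⟩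
  by_cases c : R.getLastD 0 ≠ n - 1
  · have hlt : ∀ x ∈ R, x < n - 1 := by
      intro x hx
      have hL := max_getLastD R hPR 0 x hx
      have hLR : R.getLastD 0 ∈ R := getLastD_mem R 0 (by intro h; rw [h] at hx; simp at hx)
      have := (hmem _ hLR).2
      omega
  
    rw [if_pos c]
    refine ⟨?_, ?_⟩
    · rw [List.pairwise_append]
      exact ⟨hPR, by simp, fun x hx y hy => by simp at hy; subst hy; exact hlt x hx⟩
    · intro k hk
      rcases List.mem_append.mp hk with h | h
      · exact hmem k h
      · simp at h
        omega
  · rw [if_neg c]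
    exact ⟨hPR, hmem⟩

-- R ≠ [] when step > 0 and 0 < n : 0 ∈ R
theorem pyRange_pos_ne_nil (n s : Int) (hs : 0 < s) (hn : 0 < n) :
    PySem.List.pyRange 0 n s ≠ [] := by
  intro h
  have : (0 : Int) ∈ PySem.List.pyRange 0 n s := by
    rw [PySem.List.mem_pyRange_iff_of_pos hs]
    exact ⟨le_rfl, hn, 0, by simp⟩
  rw [h] at this
  simp at this

-- ===== VERDICT (by name: the statement is the Claim_ definition above) =====
theorem dec_bynum_spec : Claim_unchanged_dec_bynum := by
  intro arr dec _ hpre hnD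
  have hs0 : (1 : Int) + dec ≠ 0 := by
    unfold Pre_dec_bynum at hpre; omega
  by_cases harr : arr = []
  · subst harr
    have hRnil : PySem.List.pyRange 0 (0 : Int) (1 + dec) = [] := by
      rcases lt_or_gt_of_ne hs0 with h | h
      · exact pyRange_neg_nil _ _ h le_rfl
      · rw [PySem.List.pyRange_of_pos _ _ h]; simp
    simp [dec_bynum, dec_bynum_alt, hRnil, PySem.List.enumerate_nil, PySem.List.slice]
  · have hlen : 0 < arr.length := List.length_pos_iff.mpr harr
    rcases lt_or_gt_of_ne hs0 with hneg | hpos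
    · -- negative step: the range is empty, kept = [n-1] on both sides (n ≥ 2 since D_ excludes n = 1)
      have hn2 : 2 ≤ arr.length := by
        rcases Nat.lt_or_ge arr.length 2 with h | h
        · exfalso
          exact hnD ⟨by omega, by unfold Pre_dec_bynum at hpre; omega⟩
        · exact h
      have hRnil : PySem.List.pyRange 0 (arr.length : Int) (1 + dec) = [] :=
        pyRange_neg_nil _ _ hneg (by positivity)
      unfold dec_bynum dec_bynum_alt
      simp only [hRnil, List.foldl_nil]
      rw [if_pos (by omega : (0 : Int) ≠ (arr.length : Int) - 1)]
      simp only [true_or, if_true]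
      simp only [List.nil_append]
      refine common arr [(arr.length : Int) - 1] (by simp) ?_
      intro k hk
      simp at hk
      subst hk
      constructor <;> omega
    · -- positive step: both kept lists are R (++ [n-1] under the same condition)
      have hRne : PySem.List.pyRange 0 (arr.length : Int) (1 + dec) ≠ [] :=
        pyRange_pos_ne_nil _ _ hpos (by exact_mod_cast hlen)
      simp only [dec_bynum, dec_bynum_alt]
      rw [foldl_collect]
      simp only [List.nil_append]
      set R := PySem.List.pyRange 0 (arr.length : Int) (1 + dec) with hR
      have hcond : (R = [] ∨ R.getLast? ≠ some ((arr.length : Int) - 1))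
          ↔ (R.getLastD 0 ≠ (arr.length : Int) - 1) := by
        rcases List.exists_cons_of_ne_nil hRne with ⟨a, t, hat⟩
        constructor
        · rintro (h | h)
          · exact absurd h hRne
          · intro hc
            apply h
            rw [hat] at hc ⊢
            rw [List.getLastD_cons] at hc
            simp [List.getLast?_cons, List.getLastD_eq_getLast?] at hc ⊢
            exact hc
        · intro h
          right
          intro hc
          apply h
          rw [hat] at hc ⊢
          rw [List.getLastD_cons]
          simp [List.getLast?_cons, List.getLastD_eq_getLast?] at hc ⊢
          exact hc
      have hif : (if R = [] ∨ R.getLast? ≠ some ((arr.length : Int) - 1) then R ++ [(arr.length : Int) - 1] else R)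
          = (if R.getLastD 0 ≠ (arr.length : Int) - 1 then R ++ [(arr.length : Int) - 1] else R) := by
        by_cases h : R.getLastD 0 ≠ (arr.length : Int) - 1
        · rw [if_pos h, if_pos (hcond.mpr h)]
        · rw [if_neg h, if_neg (fun hc => h (hcond.mp hc))]
      rw [hif]
      have hK := K_props arr (1 + dec) hpos hlen
      exact common arr _ hK.1 hK.2

theorem dec_bynum_changed : Claim_changed_dec_bynum := by
  unfold Claim_changed_dec_bynum
  refine ⟨by decide, by decide, by decide, ?_, ?_, by decide⟩ <;> decide

theorem dec_bynum_tight : Claim_exact_dec_bynum := by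
  intro arr dec _ hpre hD
  rcases hD with ⟨hlen, hdec⟩
  rcases arr with _ | ⟨x, t⟩
  · simp at hlen
  · rcases t with _ | ⟨y, t⟩
    · have hRnil : PySem.List.pyRange 0 (1 : Int) (1 + dec) = [] :=
        pyRange_neg_nil _ _ (by omega) (by norm_num)
      simp [dec_bynum, dec_bynum_alt, hRnil, PySem.List.enumerate_cons, PySem.List.enumerate_nil,
        PySem.List.slice, PySem.List.clampIdx]
    · simp at hlen
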